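-- pv_equiv track=rewrite | github.com/kkamggik/algorithms | n^2배열자르기.py | solution
-- ===== SOURCE A (Python) =====
-- def solution(n, left, right):
--     answer = []
--     r1,c1 = left//n, left%n
--     r2,c2 = right//n, right%n
--     arr = []
--     if r1==r2:
--         c = r1+1
--         m = right-left+1
--         for i in range(n):
--             if i < c1 or i > c2: continue
--             if i < c: arr.append(c)
--             else: arr.append(i+1)
--     else:
--         for i in range(r1, r2+1):
--             c = i+1
--             if i == r1: s,e = c1,n
--             elif i == r2: s,e = 0,c2
--             else: s,e = 0,n
--             for j in range(n):
--                 if j < s or j > e: continue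
--                 if j < c: arr.append(c)
--                 else: arr.append(j+1)
--     return arr
-- ===== SOURCE B (Python) =====
-- def solution(n, left, right):
--     # one flat pass: the cell at flat index k is max(row, col) + 1
--     return [max(k // n, k % n) + 1 for k in range(left, right + 1)]
-- ===== Notes on version B (the rewrite author's own statement) =====
-- stated objective: simpler
-- what changed: B replaces A's row-by-row traversal with per-row start/end casework (r1==r2 split, skip conditions) by one flat loop over the indices left..right computing max(k//n, k%n)+1 directly.
-- outside the precondition, e.g. on solution(-2, 0, 3): A returns [], B returns [1, 0, 1, 0]
import Mathlib
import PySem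

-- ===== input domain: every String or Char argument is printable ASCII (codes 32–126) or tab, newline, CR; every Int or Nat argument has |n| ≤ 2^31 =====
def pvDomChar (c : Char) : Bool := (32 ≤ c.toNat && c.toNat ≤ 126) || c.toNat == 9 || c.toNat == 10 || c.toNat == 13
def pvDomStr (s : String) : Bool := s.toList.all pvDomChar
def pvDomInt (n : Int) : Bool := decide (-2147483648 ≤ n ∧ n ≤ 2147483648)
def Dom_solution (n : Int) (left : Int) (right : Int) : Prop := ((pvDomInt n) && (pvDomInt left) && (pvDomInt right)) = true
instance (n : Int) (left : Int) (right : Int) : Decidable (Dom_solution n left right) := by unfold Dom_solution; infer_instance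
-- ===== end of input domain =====

-- B replaces A's row-by-row traversal (r1==r2 split, per-row start/end casework) by a
-- single flat loop over left..right computing max(k//n, k%n)+1; objective: simpler.

-- ===== PORT A =====
-- A's inner loop body, shared by both of A's loops: skip j outside [s,e], append c for
-- j < c else j+1 (in the r1==r2 loop s,e,c are c1,c2,r1+1; in the nested loop s,e,i+1).
def innerBody (s : Int) (e : Int) (c : Int) (arr : List Int) (j : Int) : List Int :=
  if j < s ∨ j > e then arr
  else if j < c then arr ++ [c] else arr ++ [j + 1]

-- Python A, step for step (the variable m = right-left+1 is unused in A and dropped).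
def solution (n : Int) (left : Int) (right : Int) : List Int :=
  let r1 := PySem.Int.floordiv left n
  let c1 := PySem.Int.mod left n
  let r2 := PySem.Int.floordiv right n
  let c2 := PySem.Int.mod right n
  if r1 = r2 then
    (PySem.List.pyRange 0 n 1).foldl (innerBody c1 c2 (r1 + 1)) []
  else
    (PySem.List.pyRange r1 (r2 + 1) 1).foldl
      (fun arr i =>
        let se : Int × Int :=
          if i = r1 then (c1, n) else if i = r2 then ((0 : Int), c2) else ((0 : Int), n)
        (PySem.List.pyRange 0 n 1).foldl (innerBody se.1 se.2 (i + 1)) arr) []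

-- ===== PORT B =====
def solution_alt (n : Int) (left : Int) (right : Int) : List Int :=
  (PySem.List.pyRange left (right + 1) 1).map
    (fun k => max (PySem.Int.floordiv k n) (PySem.Int.mod k n) + 1)

-- ===== PRECONDITION & SPEC =====
-- Pre_ excludes n ≤ 0: n = 0 makes A raise ZeroDivisionError, and a negative grid size n
-- is outside the function's natural domain (A's empty ranges then return [] by accident
-- while B evaluates the formula).
def Pre_solution (n : Int) (left : Int) (right : Int) : Prop := 1 ≤ n
instance (n : Int) (left : Int) (right : Int) : Decidable (Pre_solution n left right) := by
  unfold Pre_solution; infer_instance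
def pvWitness_solution : Int × Int × Int := (3, 2, 5)

def Spec_solution (n : Int) (left : Int) (right : Int) (out : List Int) : Prop := out = solution_alt n left right
instance (n : Int) (left : Int) (right : Int) (out : List Int) : Decidable (Spec_solution n left right out) := by unfold Spec_solution; infer_instance

-- ===== CLAIM (what is proved, stated in full; the proofs are below) =====
def Claim_equal_solution : Prop := ∀ (n : Int) (left : Int) (right : Int), Dom_solution n left right → Pre_solution n left right → Spec_solution n left right (solution n left right)

-- ===== LEMMAS AND PROOFS =====

-- B's per-cell value, abbreviated for the proofs.
def pvF (n : Int) (k : Int) : Int := max (PySem.Int.floordiv k n) (PySem.Int.mod k n) + 1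

lemma pv_fd_mod (n i j : Int) (hn : 1 ≤ n) (h0 : 0 ≤ j) (hj : j < n) :
    PySem.Int.floordiv (i * n + j) n = i ∧ PySem.Int.mod (i * n + j) n = j := by
  have hfd : PySem.Int.floordiv (i * n + j) n = i := by
    rw [PySem.Int.floordiv_eq_iff_of_pos (show (0:Int) < n by omega)]
    constructor
    · linarith
    · have : (i + 1) * n = i * n + n := by ring
      linarith
  refine ⟨hfd, ?_⟩
  have h := PySem.Int.floordiv_mul_add_mod (i * n + j) n
  rw [hfd] at h
  linarith

-- the cell value A appends equals B's formula at the flat index i*n+j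
lemma pv_cell (n i j : Int) (hn : 1 ≤ n) (h0 : 0 ≤ j) (hj : j < n) :
    (if j < i + 1 then i + 1 else j + 1) = pvF n (i * n + j) := by
  obtain ⟨h1, h2⟩ := pv_fd_mod n i j hn h0 hj
  unfold pvF
  rw [h1, h2]
  split <;> omega

-- empty-range case of the inner loop
lemma pv_seg_empty (n i s e t : Int) (arr : List Int) (h : n ≤ t) :
    (PySem.List.pyRange t n 1).foldl (innerBody s e (i + 1)) arr
      = arr ++ (PySem.List.pyRange (i * n + max s t) (i * n + min (e + 1) n) 1).map (pvF n) := by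
  rw [PySem.List.pyRange_one_eq_nil h,
      PySem.List.pyRange_one_eq_nil (show i * n + min (e + 1) n ≤ i * n + max s t by
        have := le_max_right s t; have := min_le_right (e + 1) n; linarith)]
  simp

-- inner loop of A from column t onward = B's formula mapped over the flat segment
lemma pv_seg (n : Int) (hn : 1 ≤ n) (i s e : Int) :
    ∀ (m : Nat) (t : Int) (arr : List Int), 0 ≤ t → n - t ≤ (m : Int) →
      (PySem.List.pyRange t n 1).foldl (innerBody s e (i + 1)) arr
        = arr ++ (PySem.List.pyRange (i * n + max s t) (i * n + min (e + 1) n) 1).map (pvF n) := by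
  intro m
  induction m with
  | zero => intro t arr ht hm; exact pv_seg_empty n i s e t arr (by omega)
  | succ m ih =>
    intro t arr ht hm
    by_cases hlt : t < n
    · rw [PySem.List.pyRange_one_cons hlt, List.foldl_cons]
      by_cases hskip : t < s ∨ t > e
      · rw [show innerBody s e (i + 1) arr t = arr by unfold innerBody; rw [if_pos hskip]]
        rw [ih (t + 1) arr (by omega) (by omega)]
        rcases hskip with hs | he
        · rw [show max s t = s by omega, show max s (t + 1) = s by omega]
        · rw [PySem.List.pyRange_one_eq_nil
                (show i * n + min (e + 1) n ≤ i * n + max s t by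
                  have := min_le_left (e + 1) n; have := le_max_right s t; omega),
              PySem.List.pyRange_one_eq_nil
                (show i * n + min (e + 1) n ≤ i * n + max s (t + 1) by
                  have := min_le_left (e + 1) n; have := le_max_right s (t + 1); omega)]
      · have hs : s ≤ t := by omega
        have he : t ≤ e := by omega
        have hbody : innerBody s e (i + 1) arr t = arr ++ [pvF n (i * n + t)] := by
          unfold innerBody
          rw [if_neg (by omega), ← pv_cell n i t hn ht hlt]
          split <;> rfl
        rw [hbody, ih (t + 1) (arr ++ [pvF n (i * n + t)]) (by omega) (by omega)]
        rw [show max s t = t by omega, show max s (t + 1) = (t + 1) by omega]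
        rw [show (PySem.List.pyRange (i * n + t) (i * n + min (e + 1) n) 1)
              = (i * n + t) :: PySem.List.pyRange (i * n + t + 1) (i * n + min (e + 1) n) 1 from
            PySem.List.pyRange_one_cons (by omega)]
        rw [show i * n + (t + 1) = i * n + t + 1 by ring]
        simp
    · exact pv_seg_empty n i s e t arr (by omega)

-- the row function of A's outer loop, with the tuple branch resolved
lemma pv_row (n r1 c1 r2 c2 t : Int) (arr : List Int) :
    (PySem.List.pyRange 0 n 1).foldl
        (innerBody
          (if t = r1 then (c1, n) else if t = r2 then ((0 : Int), c2) else ((0 : Int), n)).1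
          (if t = r1 then (c1, n) else if t = r2 then ((0 : Int), c2) else ((0 : Int), n)).2
          (t + 1)) arr
      = (PySem.List.pyRange 0 n 1).foldl
          (innerBody (if t = r1 then c1 else 0)
            (if t = r1 then n else if t = r2 then c2 else n) (t + 1)) arr := by
  split_ifs <;> rfl

-- outer loop of A over rows t..r2 (t > r1) = B's formula mapped over the flat tail
lemma pv_outer (n r1 c1 r2 c2 : Int) (hn : 1 ≤ n) (hc2 : 0 ≤ c2 ∧ c2 < n) :
    ∀ (m : Nat) (t : Int) (arr : List Int), r1 < t → r2 + 1 - t ≤ (m : Int) →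
      (PySem.List.pyRange t (r2 + 1) 1).foldl
        (fun arr i =>
          (PySem.List.pyRange 0 n 1).foldl
            (innerBody
              (if i = r1 then (c1, n) else if i = r2 then ((0 : Int), c2) else ((0 : Int), n)).1
              (if i = r1 then (c1, n) else if i = r2 then ((0 : Int), c2) else ((0 : Int), n)).2
              (i + 1)) arr) arr
      = arr ++ (PySem.List.pyRange (t * n) (r2 * n + c2 + 1) 1).map (pvF n) := by
  intro m
  induction m with
  | zero =>
    intro t arr ht hm
    rw [PySem.List.pyRange_one_eq_nil (show r2 + 1 ≤ t by omega),
        PySem.List.pyRange_one_eq_nil (show r2 * n + c2 + 1 ≤ t * n by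
          nlinarith [mul_le_mul_of_nonneg_right (show r2 + 1 ≤ t by omega)
            (show (0:Int) ≤ n by omega)])]
    simp
  | succ m ih =>
    intro t arr ht hm
    by_cases hlt : t < r2 + 1
    · rw [show PySem.List.pyRange t (r2 + 1) 1 = t :: PySem.List.pyRange (t + 1) (r2 + 1) 1
            from PySem.List.pyRange_one_cons hlt, List.foldl_cons, pv_row]
      rw [if_neg (show ¬ t = r1 by omega)]
      by_cases hr2 : t = r2
      · subst hr2
        rw [if_neg (show ¬ t = r1 by omega), if_pos rfl]
        rw [pv_seg n hn t 0 c2 n.toNat 0 arr le_rfl (by omega)]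
        rw [PySem.List.pyRange_one_eq_nil (le_refl (t + 1)), List.foldl_nil]
        rw [show max 0 0 = (0 : Int) by omega, show min (c2 + 1) n = c2 + 1 by omega,
            add_zero, show t * n + (c2 + 1) = t * n + c2 + 1 by ring]
      · rw [if_neg (show ¬ t = r1 by omega), if_neg hr2]
        rw [pv_seg n hn t 0 n n.toNat 0 arr le_rfl (by omega)]
        rw [ih (t + 1) _ (by omega) (by omega)]
        rw [show max 0 0 = (0 : Int) by omega, show min (n + 1) n = n by omega, add_zero]
        rw [show (t + 1) * n = t * n + n by ring]
        rw [List.append_assoc, ← List.map_append]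
        rw [← PySem.List.pyRange_one_append (t * n) (t * n + n) (r2 * n + c2 + 1)
              (by linarith)
              (by nlinarith [mul_le_mul_of_nonneg_right (show t + 1 ≤ r2 by omega)
                    (show (0:Int) ≤ n by omega)])]
    · rw [PySem.List.pyRange_one_eq_nil (show r2 + 1 ≤ t by omega),
          PySem.List.pyRange_one_eq_nil (show r2 * n + c2 + 1 ≤ t * n by
            nlinarith [mul_le_mul_of_nonneg_right (show r2 + 1 ≤ t by omega)
              (show (0:Int) ≤ n by omega)])]
      simp

-- ===== VERDICT (by name: the statement is the Claim_ definition above) =====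
theorem solution_spec : Claim_equal_solution := by
  intro n left right _hdom hpre
  have hn : 1 ≤ n := hpre
  unfold Spec_solution solution solution_alt
  simp only []
  set r1 := PySem.Int.floordiv left n with hr1
  set c1 := PySem.Int.mod left n with hc1
  set r2 := PySem.Int.floordiv right n with hr2
  set c2 := PySem.Int.mod right n with hc2
  have hl : r1 * n + c1 = left := PySem.Int.floordiv_mul_add_mod left n
  have hr : r2 * n + c2 = right := PySem.Int.floordiv_mul_add_mod right n
  have hc1b : 0 ≤ c1 ∧ c1 < n :=
    ⟨PySem.Int.mod_nonneg left (by omega), PySem.Int.mod_lt left (by omega)⟩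
  have hc2b : 0 ≤ c2 ∧ c2 < n :=
    ⟨PySem.Int.mod_nonneg right (by omega), PySem.Int.mod_lt right (by omega)⟩
  by_cases heq : r1 = r2
  · rw [if_pos heq]
    rw [pv_seg n hn r1 c1 c2 n.toNat 0 [] le_rfl (by omega)]
    rw [show max c1 0 = c1 by omega, show min (c2 + 1) n = c2 + 1 by omega]
    rw [show r1 * n + c1 = left from hl, show r1 * n + (c2 + 1) = right + 1 by
      rw [heq]; omega]
    rfl
  · rw [if_neg heq]
    by_cases hlt : r1 < r2
    · rw [show PySem.List.pyRange r1 (r2 + 1) 1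
            = r1 :: PySem.List.pyRange (r1 + 1) (r2 + 1) 1 from
          PySem.List.pyRange_one_cons (by omega), List.foldl_cons, pv_row]
      rw [if_pos rfl, if_pos rfl]
      rw [pv_seg n hn r1 c1 n n.toNat 0 [] le_rfl (by omega)]
      rw [pv_outer n r1 c1 r2 c2 hn hc2b (r2 + 1 - (r1 + 1)).toNat (r1 + 1) _ (by omega)
            (by omega)]
      rw [show max c1 0 = c1 by omega, show min (n + 1) n = n by omega]
      rw [List.nil_append, ← List.map_append]
      rw [show (r1 + 1) * n = r1 * n + n by ring]
      rw [← PySem.List.pyRange_one_append (r1 * n + c1) (r1 * n + n) (r2 * n + c2 + 1)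
            (by omega)
            (by nlinarith [mul_le_mul_of_nonneg_right (show r1 + 1 ≤ r2 by omega)
                  (show (0:Int) ≤ n by omega)])]
      rw [hl, show r2 * n + c2 + 1 = right + 1 by omega]
      rfl
    · rw [show PySem.List.pyRange r1 (r2 + 1) 1 = [] from
            PySem.List.pyRange_one_eq_nil (by omega), List.foldl_nil,
          show PySem.List.pyRange left (right + 1) 1 = [] from
            PySem.List.pyRange_one_eq_nil (show right + 1 ≤ left by
              nlinarith [mul_le_mul_of_nonneg_right (show r2 + 1 ≤ r1 by omega)
                (show (0:Int) ≤ n by omega)])]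
      rfl
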